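-- pv_equiv track=rewrite | github.com/flopshoubox/VRML-ProceduralGeneration | TreeClass/CostumPrint.py | listStr3
-- ===== SOURCE A (Python) =====
-- def listStr3(list, tab):
--     ind = 0
--     stri = "\t" * tab + " "
--     for x in list:
--         ind += 1
--         if ind%3 == 0:
--             stri += str(x) + ",\n" + "\t" * tab + " "
--         else:
--             stri += str(x) + " "
--     return stri
-- ===== SOURCE B (Python) =====
-- def listStr3(list, tab):
--     indent = "\t" * tab + " "
--     parts = [indent]
--     rest = list
--     while rest:
--         group, rest = rest[:3], rest[3:]
--         parts.append(" ".join(str(x) for x in group))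
--         parts.append(",\n" + indent if len(group) == 3 else " ")
--     return "".join(parts)
-- ===== Notes on version B (the rewrite author's own statement) =====
-- stated objective: alternative
-- what changed: B traverses the list in chunks of three (slicing rest[:3]/rest[3:] and joining each group with ' '), collecting pieces in a list joined once at the end, instead of A's per-element loop with a modulo counter and string concatenation.
import Mathlib
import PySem

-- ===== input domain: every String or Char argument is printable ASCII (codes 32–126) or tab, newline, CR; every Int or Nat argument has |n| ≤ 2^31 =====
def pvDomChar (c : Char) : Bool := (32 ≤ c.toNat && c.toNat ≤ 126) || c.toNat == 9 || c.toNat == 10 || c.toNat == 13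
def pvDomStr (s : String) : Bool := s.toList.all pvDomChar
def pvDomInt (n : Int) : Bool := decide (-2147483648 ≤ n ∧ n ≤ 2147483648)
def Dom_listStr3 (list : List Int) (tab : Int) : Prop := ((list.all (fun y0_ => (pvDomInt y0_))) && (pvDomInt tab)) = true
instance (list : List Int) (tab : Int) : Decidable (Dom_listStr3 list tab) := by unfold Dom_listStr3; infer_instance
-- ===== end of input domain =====

-- B formats the list in chunks of three joined with spaces instead of A's per-element
-- modulo counter; objective: alternative decomposition, same result.

-- ===== PORT A =====
-- "\t" * tab  as a character list (PySem.List.pyRepeat is Python's list/str repetition)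
def pvIndent (tab : Int) : List Char := PySem.List.pyRepeat ['\t'] tab ++ [' ']

def pvStepA (tab : Int) (s : Int × List Char) (x : Int) : Int × List Char :=
  let ind := s.1 + 1
  if PySem.Int.mod ind 3 == 0 then
    (ind, s.2 ++ PySem.Int.toChars x ++ (',' :: '\n' :: pvIndent tab))
  else
    (ind, s.2 ++ PySem.Int.toChars x ++ [' '])

def listStr3 (list : List Int) (tab : Int) : String :=
  String.ofList (list.foldl (pvStepA tab) ((0 : Int), pvIndent tab)).2

-- ===== PORT B =====
-- the while loop of Source B: consume the list three at a time
def altChunks (indent : List Char) : List Int → List Char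
  | [] => []
  | x :: xs =>
    let group := x :: xs.take 2            -- rest[:3]
    PySem.Chars.join [' '] (group.map PySem.Int.toChars) ++
      (if group.length == 3 then ',' :: '\n' :: indent else [' ']) ++
      altChunks indent (xs.drop 2)         -- rest[3:]
termination_by rest => rest.length
decreasing_by simp [List.length_drop]

def listStr3_alt (list : List Int) (tab : Int) : String :=
  let indent := pvIndent tab
  String.ofList (indent ++ altChunks indent list)

-- ===== PRECONDITION & SPEC =====
def Spec_listStr3 (list : List Int) (tab : Int) (out : String) : Prop := out = listStr3_alt list tab
instance (list : List Int) (tab : Int) (out : String) : Decidable (Spec_listStr3 list tab out) := by unfold Spec_listStr3; infer_instance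

-- ===== CLAIM (what is proved, stated in full; the proofs are below) =====
def Claim_equal_listStr3 : Prop := ∀ (list : List Int) (tab : Int), Dom_listStr3 list tab → Spec_listStr3 list tab (listStr3 list tab)

-- ===== LEMMAS AND PROOFS =====
theorem pvLoop_eq (tab : Int) : ∀ (n : Nat) (list : List Int), list.length ≤ n →
    ∀ (k : Int) (s : List Char),
      (list.foldl (pvStepA tab) (3 * k, s)).2 = s ++ altChunks (pvIndent tab) list := by
  intro n
  induction n with
  | zero =>
    intro list h k s
    have : list = [] := List.eq_nil_of_length_eq_zero (Nat.le_zero.mp h)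
    subst this; simp [altChunks]
  | succ n ih =>
    intro list h k s
    have h2 : ¬ ((3:Int) ∣ 3*k+1+1) := by omega
    have h3 : ((3:Int) ∣ 3*k+1+1+1) := by omega
    match list with
    | [] => simp [altChunks]
    | [a] =>
      simp [altChunks, pvStepA, PySem.Chars.join_singleton]
    | [a, b] =>
      simp [altChunks, pvStepA, h2, PySem.Chars.join_cons_cons,
        PySem.Chars.join_singleton]
    | a :: b :: c :: rest =>
      have hr : rest.length ≤ n := by simp at h; omega
      simp [List.foldl_cons, pvStepA, altChunks, h2, h3,
        PySem.Chars.join_cons_cons, PySem.Chars.join_singleton]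
      rw [show (3*k+1+1+1 : Int) = 3*(k+1) from by ring, ih rest hr (k+1) _]
      simp

theorem listStr3_spec : Claim_equal_listStr3 := by
  intro list tab _
  unfold Spec_listStr3 listStr3 listStr3_alt
  have h := pvLoop_eq tab list.length list le_rfl 0 (pvIndent tab)
  simpa using congrArg String.ofList h
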